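-- pv_equiv track=rewrite | github.com/Artilleryxd/bajat-capstone | backend/services/file_parser.py | _heuristic_column_mapping
-- ===== SOURCE A (Python) =====
-- from typing import Optional
--
-- def _heuristic_column_mapping(headers: list[str]) -> Optional[dict]:
--     """Try to auto-detect column mapping from common header names."""
--     headers_lower = [h.lower().strip() for h in headers]
--
--     mapping: dict[str, Optional[str]] = {
--         "date": None,
--         "description": None,
--         "debit": None,
--         "credit": None,
--     }
--
--     date_keywords = ["date", "transaction date", "txn date", "value date", "posting date"]
--     desc_keywords = ["description", "narration", "particulars", "details", "remarks", "memo"]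
--     debit_keywords = ["debit", "withdrawal", "amount", "debit amount", "debit amt"]
--     credit_keywords = ["credit", "deposit", "credit amount", "credit amt"]
--
--     for i, h in enumerate(headers_lower):
--         if not mapping["date"] and any(k == h for k in date_keywords):
--             mapping["date"] = headers[i]
--         if not mapping["description"] and any(k == h for k in desc_keywords):
--             mapping["description"] = headers[i]
--         if not mapping["debit"] and any(k == h for k in debit_keywords):
--             mapping["debit"] = headers[i]
--         if not mapping["credit"] and any(k == h for k in credit_keywords):
--             mapping["credit"] = headers[i]
--
--     # Must have at least description and debit/amount
--     if mapping["description"] and mapping["debit"]: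
--         return mapping
--
--     return None
-- ===== SOURCE B (Python) =====
-- from typing import Optional
--
-- _DATE_KW = {"date", "transaction date", "txn date", "value date", "posting date"}
-- _DESC_KW = {"description", "narration", "particulars", "details", "remarks", "memo"}
-- _DEBIT_KW = {"debit", "withdrawal", "amount", "debit amount", "debit amt"}
-- _CREDIT_KW = {"credit", "deposit", "credit amount", "credit amt"}
--
-- def _find_first(keyword_set, headers):
--     """First original header whose lowered/stripped form is in keyword_set, else None."""
--     for h in headers:
--         if h.lower().strip() in keyword_set:
--             return h
--     return None
--
-- def _heuristic_column_mapping(headers: list[str]) -> Optional[dict]: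
--     mapping = {
--         "date": _find_first(_DATE_KW, headers),
--         "description": _find_first(_DESC_KW, headers),
--         "debit": _find_first(_DEBIT_KW, headers),
--         "credit": _find_first(_CREDIT_KW, headers),
--     }
--     if mapping["description"] is not None and mapping["debit"] is not None:
--         return mapping
--     return None
-- ===== Notes on version B (the rewrite author's own statement) =====
-- stated objective: simpler
-- what changed: Replaces the single stateful pass with 'not mapping[...]' guards by a tiny find_first helper run once per field (four focused scans), keeping earliest-header-wins and the description+debit return check.
import Mathlib
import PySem

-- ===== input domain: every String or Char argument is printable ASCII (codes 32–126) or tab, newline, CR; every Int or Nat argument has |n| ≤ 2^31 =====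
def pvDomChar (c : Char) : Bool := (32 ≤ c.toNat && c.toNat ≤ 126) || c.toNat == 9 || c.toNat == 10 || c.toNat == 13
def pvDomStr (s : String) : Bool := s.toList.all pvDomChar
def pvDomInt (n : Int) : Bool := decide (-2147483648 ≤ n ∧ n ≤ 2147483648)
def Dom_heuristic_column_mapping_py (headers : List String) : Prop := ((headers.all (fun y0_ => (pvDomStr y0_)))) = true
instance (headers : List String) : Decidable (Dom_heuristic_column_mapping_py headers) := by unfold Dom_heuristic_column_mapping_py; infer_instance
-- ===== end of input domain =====

-- B: same column auto-detection, but a find_first helper run once per field (four focused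
-- scans) instead of one stateful pass with truthiness guards; objective: simpler.


-- ===== PORT A =====
-- h.lower().strip()
def pvNorm (h : String) : String := PySem.Str.strip (PySem.Str.lower h)

def pvDateKw : List String := ["date", "transaction date", "txn date", "value date", "posting date"]
def pvDescKw : List String := ["description", "narration", "particulars", "details", "remarks", "memo"]
def pvDebitKw : List String := ["debit", "withdrawal", "amount", "debit amount", "debit amt"]
def pvCreditKw : List String := ["credit", "deposit", "credit amount", "credit amt"]

-- the mapping dict has these four fixed keys throughout; represented as a record,
-- re-assembled in insertion order (date, description, debit, credit) at the end
structure PVMap where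
  date : Option String
  descr : Option String
  debit : Option String
  credit : Option String
deriving DecidableEq, Repr

-- Python truthiness of Optional[str]: falsy iff None or ""
def pvFalsy : Option String → Bool
  | none => true
  | some s => s == ""

-- loop body: the four `if not mapping[...] and any(k == h ...)` updates, in order;
-- `for i, h in enumerate(headers_lower)` with `headers[i]` is ported as a fold over
-- zip headers headers_lower (the same (original, lowered) pairs in the same order)
def pvStepA (m : PVMap) (p : String × String) : PVMap :=
  let m := if pvFalsy m.date && pvDateKw.any (fun k => k == p.2) then { m with date := some p.1 } else m
  let m := if pvFalsy m.descr && pvDescKw.any (fun k => k == p.2) then { m with descr := some p.1 } else m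
  let m := if pvFalsy m.debit && pvDebitKw.any (fun k => k == p.2) then { m with debit := some p.1 } else m
  let m := if pvFalsy m.credit && pvCreditKw.any (fun k => k == p.2) then { m with credit := some p.1 } else m
  m

def heuristic_column_mapping_py (headers : List String) : Option (List (String × Option String)) :=
  let headersLower := headers.map pvNorm
  let m := (List.zip headers headersLower).foldl pvStepA ⟨none, none, none, none⟩
  if !pvFalsy m.descr && !pvFalsy m.debit then
    some [("date", m.date), ("description", m.descr), ("debit", m.debit), ("credit", m.credit)]
  else
    none

-- ===== PORT B =====
def pvFindFirst (kws : List String) (headers : List String) : Option String :=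
  match headers with
  | [] => none
  | h :: t => if kws.contains (pvNorm h) then some h else pvFindFirst kws t

def heuristic_column_mapping_py_alt (headers : List String) : Option (List (String × Option String)) :=
  let d := pvFindFirst pvDateKw headers
  let de := pvFindFirst pvDescKw headers
  let db := pvFindFirst pvDebitKw headers
  let cr := pvFindFirst pvCreditKw headers
  match de, db with
  | some _, some _ => some [("date", d), ("description", de), ("debit", db), ("credit", cr)]
  | _, _ => none

-- ===== PRECONDITION & SPEC =====
def Spec_heuristic_column_mapping_py (headers : List String) (out : Option (List (String × Option String))) : Prop := out = heuristic_column_mapping_py_alt headers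
instance (headers : List String) (out : Option (List (String × Option String))) : Decidable (Spec_heuristic_column_mapping_py headers out) := by unfold Spec_heuristic_column_mapping_py; infer_instance

-- ===== CLAIM (what is proved, stated in full; the proofs are below) =====
def Claim_equal_heuristic_column_mapping_py : Prop := ∀ (headers : List String), Dom_heuristic_column_mapping_py headers → Spec_heuristic_column_mapping_py headers (heuristic_column_mapping_py headers)

-- ===== LEMMAS AND PROOFS =====

-- no keyword list contains the empty string, so a matched original header is nonempty
theorem pvNorm_empty : pvNorm "" = "" := by decide

theorem kw_match_ne_empty {kws : List String} (h : String)
    (hne : kws.contains "" = false) (hm : kws.any (fun k => k == pvNorm h) = true) :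
    h ≠ "" := by
  intro he
  subst he
  rw [pvNorm_empty] at hm
  simp only [List.any_eq_true, beq_iff_eq] at hm
  obtain ⟨k, hk, hke⟩ := hm
  subst hke
  have : kws.contains "" = true := by
    rw [List.contains_eq_any_beq]
    simp only [List.any_eq_true, beq_iff_eq]
    exact ⟨"", hk, rfl⟩
  rw [this] at hne
  exact absurd hne (by decide)

-- a state field is "good" if it is not `some ""` (then pvFalsy = its isNone)
def pvGood (o : Option String) : Prop := o ≠ some ""

theorem pvFalsy_good {o : Option String} (h : pvGood o) : pvFalsy o = o.isNone := by
  cases o with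
  | none => rfl
  | some s =>
    simp only [pvFalsy, Option.isNone_some]
    simp only [pvGood, ne_eq, Option.some.injEq] at h
    simp [h]

-- findFirst never returns `some ""` (keywords are nonempty)
theorem pvFindFirst_good {kws : List String} (hkw : kws.contains "" = false) :
    ∀ headers : List String, pvGood (pvFindFirst kws headers) := by
  intro headers
  induction headers with
  | nil => simp [pvFindFirst, pvGood]
  | cons h t ih =>
    simp only [pvFindFirst]
    by_cases hc : kws.contains (pvNorm h) = true
    · rw [if_pos hc]
      have hm : kws.any (fun k => k == pvNorm h) = true := by
        rw [List.contains_eq_any_beq] at hc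
        simp only [List.any_eq_true, beq_iff_eq] at hc ⊢
        obtain ⟨k, hk, hke⟩ := hc
        exact ⟨k, hk, hke.symm⟩
      have := kw_match_ne_empty h hkw hm
      simp [pvGood, this]
    · rw [if_neg hc]; exact ih

-- contains ↔ any (k == ·) for strings
theorem contains_eq_any (kws : List String) (s : String) :
    kws.contains s = kws.any (fun k => k == s) := by
  rw [List.contains_eq_any_beq]
  congr 1
  funext k
  by_cases h : s = k
  · subst h; rfl
  · have h2 : ¬ k = s := fun e => h e.symm
    simp [h, h2]

-- projection of one fold field: each field evolves independently, find-first style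
theorem fold_field (proj : PVMap → Option String) (kws : List String)
    (hproj : ∀ m p, proj (pvStepA m p) =
      if pvFalsy (proj m) && kws.any (fun k => k == p.2) then some p.1 else proj m)
    (hkw : kws.contains "" = false) :
    ∀ (headers : List String) (m : PVMap), pvGood (proj m) →
      proj ((List.zip headers (headers.map pvNorm)).foldl pvStepA m) =
        (proj m).or (pvFindFirst kws headers) := by
  intro headers
  induction headers with
  | nil => intro m _; cases h : proj m <;> simp [h, pvFindFirst]
  | cons h t ih =>
    intro m hg
    simp only [List.map_cons, List.zip_cons_cons, List.foldl_cons]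
    have hstep := hproj m (h, pvNorm h)
    cases hpm : proj m with
    | some s =>
      rw [hpm] at hg hstep
      rw [pvFalsy_good hg] at hstep
      simp only [Option.isNone_some, Bool.false_and, if_neg Bool.false_ne_true] at hstep
      rw [ih _ (by rw [hstep]; exact hg), hstep]
      simp [Option.or]
    | none =>
      rw [hpm] at hstep
      simp only [pvFalsy, Bool.true_and] at hstep
      by_cases hmatch : kws.any (fun k => k == pvNorm h) = true
      · rw [if_pos hmatch] at hstep
        have hne : h ≠ "" := kw_match_ne_empty h hkw hmatch
        have hg' : pvGood (proj (pvStepA m (h, pvNorm h))) := by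
          rw [hstep]; simp [pvGood, hne]
        rw [ih _ hg', hstep]
        simp only [pvFindFirst, Option.none_or]
        rw [contains_eq_any, hmatch, if_pos rfl]
        simp [Option.or]
      · rw [if_neg hmatch] at hstep
        rw [ih _ (by rw [hstep]; simp [pvGood]), hstep]
        simp only [pvFindFirst, Option.none_or]
        rw [contains_eq_any, Bool.eq_false_iff.mpr hmatch, if_neg Bool.false_ne_true]

theorem step_date (m : PVMap) (p : String × String) :
    (pvStepA m p).date = if pvFalsy m.date && pvDateKw.any (fun k => k == p.2) then some p.1 else m.date := by
  simp only [pvStepA]; split_ifs <;> rfl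

theorem step_descr (m : PVMap) (p : String × String) :
    (pvStepA m p).descr = if pvFalsy m.descr && pvDescKw.any (fun k => k == p.2) then some p.1 else m.descr := by
  simp only [pvStepA]; split_ifs <;> rfl

theorem step_debit (m : PVMap) (p : String × String) :
    (pvStepA m p).debit = if pvFalsy m.debit && pvDebitKw.any (fun k => k == p.2) then some p.1 else m.debit := by
  simp only [pvStepA]; split_ifs <;> rfl

theorem step_credit (m : PVMap) (p : String × String) :
    (pvStepA m p).credit = if pvFalsy m.credit && pvCreditKw.any (fun k => k == p.2) then some p.1 else m.credit := by
  simp only [pvStepA]; split_ifs <;> rfl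

theorem dateKw_ne : pvDateKw.contains "" = false := by decide
theorem descKw_ne : pvDescKw.contains "" = false := by decide
theorem debitKw_ne : pvDebitKw.contains "" = false := by decide
theorem creditKw_ne : pvCreditKw.contains "" = false := by decide

-- ===== VERDICT (by name: the statement is the Claim_ definition above) =====
theorem heuristic_column_mapping_py_spec : Claim_equal_heuristic_column_mapping_py := by
  intro headers _
  show heuristic_column_mapping_py headers = heuristic_column_mapping_py_alt headers
  unfold heuristic_column_mapping_py heuristic_column_mapping_py_alt
  have hg0 : pvGood (none : Option String) := by simp [pvGood]
  have hd := fold_field PVMap.date pvDateKw step_date dateKw_ne headers ⟨none, none, none, none⟩ hg0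
  have hde := fold_field PVMap.descr pvDescKw step_descr descKw_ne headers ⟨none, none, none, none⟩ hg0
  have hdb := fold_field PVMap.debit pvDebitKw step_debit debitKw_ne headers ⟨none, none, none, none⟩ hg0
  have hcr := fold_field PVMap.credit pvCreditKw step_credit creditKw_ne headers ⟨none, none, none, none⟩ hg0
  simp only [Option.none_or] at hd hde hdb hcr
  simp only [hd, hde, hdb, hcr]
  have gde := pvFindFirst_good descKw_ne headers
  have gdb := pvFindFirst_good debitKw_ne headers
  rw [pvFalsy_good gde, pvFalsy_good gdb]
  cases pvFindFirst pvDescKw headers <;> cases pvFindFirst pvDebitKw headers <;> simp
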